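-- pv_equiv track=rewrite | github.com/PRETHIV-zz/Problem_Solver | 251_Ultimate_Warrior.py | abcount
-- ===== SOURCE A (Python) =====
-- def abcount(s,i):
--     l=i+1
--     if l==len(s):
--         return 1
--     else:
--         if s[i]=='a' and s[l]=='b':
--             return 1+abcount(s,l)
--         if s[i]=='b' and s[l]=='a':
--             return 1+abcount(s,l)
--         else:
--             return 1
-- ===== SOURCE B (Python) =====
-- def abcount(s, i):
--     l = i + 1
--     while l != len(s) and s[l - 1] + s[l] in ("ab", "ba"):
--         l += 1
--     return l - i
-- ===== Notes on version B (the rewrite author's own statement) =====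
-- stated objective: alternative
-- what changed: Replaces the recursion carrying a count (one stack frame per matched pair) by a flat scan that only advances an index l while the pair s[l-1]+s[l] is 'ab' or 'ba' and returns l - i at the end, so no count accumulator and no recursion.
import Mathlib
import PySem

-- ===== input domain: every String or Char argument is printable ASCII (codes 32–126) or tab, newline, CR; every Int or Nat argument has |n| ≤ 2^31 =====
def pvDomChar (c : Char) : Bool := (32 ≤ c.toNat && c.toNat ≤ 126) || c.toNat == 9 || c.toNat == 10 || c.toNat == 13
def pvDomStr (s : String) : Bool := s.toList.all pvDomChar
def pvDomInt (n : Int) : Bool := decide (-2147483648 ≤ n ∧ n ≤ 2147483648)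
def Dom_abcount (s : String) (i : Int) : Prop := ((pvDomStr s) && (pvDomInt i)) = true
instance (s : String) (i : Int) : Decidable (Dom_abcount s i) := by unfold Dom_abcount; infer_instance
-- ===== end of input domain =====

-- B replaces A's count-carrying recursion by a flat index scan that advances l while the
-- pair s[l-1]s[l] is "ab"/"ba" and returns l - i (same return values; A raises IndexError
-- outside Pre_abcount, which Pre_abcount excludes). Both ports carry a fuel parameter as a
-- totality guard only; the fuel (len - i) + 1 exceeds the number of steps either recursion
-- takes on any input, since the index strictly increases and a match requires it in range.

-- ===== PORT A =====
def abcountA (fuel : Nat) (cs : List Char) (i : Int) : Int :=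
  match fuel with
  | 0 => 1
  | Nat.succ fuel =>
    if i + 1 = (cs.length : Int) then 1
    else if PySem.List.pyGetD cs i ' ' = 'a' ∧ PySem.List.pyGetD cs (i + 1) ' ' = 'b' then
      1 + abcountA fuel cs (i + 1)
    else if PySem.List.pyGetD cs i ' ' = 'b' ∧ PySem.List.pyGetD cs (i + 1) ' ' = 'a' then
      1 + abcountA fuel cs (i + 1)
    else 1

def abcount (s : String) (i : Int) : Int :=
  abcountA (((s.toList.length : Int) - i).toNat + 1) s.toList i

-- ===== PORT B =====
-- the while-loop: advance l while l != len(s) and s[l-1] + s[l] in ("ab", "ba"); returns the final l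
def abScan (fuel : Nat) (cs : List Char) (l : Int) : Int :=
  match fuel with
  | 0 => l
  | Nat.succ fuel =>
    if l ≠ (cs.length : Int) ∧
        [PySem.List.pyGetD cs (l - 1) ' ', PySem.List.pyGetD cs l ' '] ∈
          ([['a', 'b'], ['b', 'a']] : List (List Char)) then
      abScan fuel cs (l + 1)
    else l

def abcount_alt (s : String) (i : Int) : Int :=
  abScan (((s.toList.length : Int) - i).toNat + 1) s.toList (i + 1) - i

-- ===== PRECONDITION & SPEC =====
-- Pre_ excludes exactly the inputs where Python A raises IndexError (an out-of-range index
-- reached before the l == len(s) early return); A returns normally on every other input.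
def Pre_abcount (s : String) (i : Int) : Prop :=
  i + 1 = (s.toList.length : Int) ∨ (-(s.toList.length : Int) ≤ i ∧ i + 1 < (s.toList.length : Int))
instance (s : String) (i : Int) : Decidable (Pre_abcount s i) := by unfold Pre_abcount; infer_instance
def pvWitness_abcount : String × Int := ("a", 0)

def Spec_abcount (s : String) (i : Int) (out : Int) : Prop := out = abcount_alt s i
instance (s : String) (i : Int) (out : Int) : Decidable (Spec_abcount s i out) := by unfold Spec_abcount; infer_instance

-- ===== CLAIM (what is proved, stated in full; the proofs are below) =====
def Claim_equal_abcount : Prop := ∀ (s : String) (i : Int), Dom_abcount s i → Pre_abcount s i → Spec_abcount s i (abcount s i)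

-- ===== LEMMAS AND PROOFS =====
theorem abScan_eq_abcountA (cs : List Char) (fuel : Nat) :
    ∀ l : Int, abScan fuel cs l = (l - 1) + abcountA fuel cs (l - 1) := by
  induction fuel with
  | zero => intro l; simp only [abScan, abcountA]; omega
  | succ n ih =>
    intro l
    have hstep : l - 1 + 1 = l := by omega
    by_cases hc : l ≠ (cs.length : Int) ∧
        [PySem.List.pyGetD cs (l - 1) ' ', PySem.List.pyGetD cs l ' '] ∈
          ([['a', 'b'], ['b', 'a']] : List (List Char))
    · rw [abScan, if_pos hc, ih (l + 1)]
      have h11 : l + 1 - 1 = l := by omega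
      rw [h11]
      have hA : abcountA (n + 1) cs (l - 1) = 1 + abcountA n cs l := by
        rw [abcountA, hstep, if_neg hc.1]
        have h2' := hc.2
        simp only [List.mem_cons, List.not_mem_nil, or_false] at h2'
        rcases h2' with h2 | h2
        · have h1 : PySem.List.pyGetD cs (l - 1) ' ' = 'a' := by injection h2
          have hb : PySem.List.pyGetD cs l ' ' = 'b' := by injection h2 with _ t; injection t
          rw [if_pos ⟨h1, hb⟩]
        · have h1 : PySem.List.pyGetD cs (l - 1) ' ' = 'b' := by injection h2
          have hb : PySem.List.pyGetD cs l ' ' = 'a' := by injection h2 with _ t; injection t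
          have hab : ¬ (PySem.List.pyGetD cs (l - 1) ' ' = 'a' ∧ PySem.List.pyGetD cs l ' ' = 'b') := by
            rintro ⟨hcon, _⟩; rw [h1] at hcon; exact absurd hcon (by decide)
          rw [if_neg hab, if_pos ⟨h1, hb⟩]
      rw [hA]
      omega
    · rw [abScan, if_neg hc, abcountA, hstep]
      by_cases hlen : l = (cs.length : Int)
      · rw [if_pos hlen]; omega
      · rw [if_neg hlen]
        have hnm : ¬ [PySem.List.pyGetD cs (l - 1) ' ', PySem.List.pyGetD cs l ' '] ∈
            ([['a', 'b'], ['b', 'a']] : List (List Char)) := fun hmem => hc ⟨hlen, hmem⟩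
        have hab : ¬ (PySem.List.pyGetD cs (l - 1) ' ' = 'a' ∧ PySem.List.pyGetD cs l ' ' = 'b') := by
          rintro ⟨h1, h2⟩; exact hnm (by rw [h1, h2]; exact List.mem_cons_self ..)
        have hba : ¬ (PySem.List.pyGetD cs (l - 1) ' ' = 'b' ∧ PySem.List.pyGetD cs l ' ' = 'a') := by
          rintro ⟨h1, h2⟩; exact hnm (by rw [h1, h2]; exact List.mem_cons_of_mem _ (List.mem_cons_self ..))
        rw [if_neg hab, if_neg hba]
        omega

-- ===== VERDICT (by name: the statement is the Claim_ definition above) =====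
theorem abcount_spec : Claim_equal_abcount := by
  intro s i _ _
  unfold Spec_abcount abcount abcount_alt
  rw [abScan_eq_abcountA]
  have hstep : i + 1 - 1 = i := by omega
  rw [hstep]
  omega
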